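-- pv_equiv track=rewrite | github.com/leowcy/Algorithm | LeetCode/medium/1482-minmum-num-make-m-bouquets.py | _check_if_satisfied
-- ===== SOURCE A (Python) =====
-- def _check_if_satisfied(bloomed_list: list[int], m: int, k: int) -> bool:
--     # find k adjacent number now
--     i, j = 0, k
--     found_bouquet = 0
--     while j <= len(bloomed_list):
--         cur_bloomed_list = bloomed_list[i:j]
--         temp_sum = sum(cur_bloomed_list)
--         if temp_sum >= k: # found one qualified
--             found_bouquet += 1
--             i = j
--             j = i + k
--         else:
--             i += 1
--             j += 1
--
--     return found_bouquet >= m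
-- ===== SOURCE B (Python) =====
-- def _check_if_satisfied(bloomed_list: list[int], m: int, k: int) -> bool:
--     # prefix sums built once; greedy pointer walk, one subtraction per window test
--     prefix = [0]
--     s = 0
--     for x in bloomed_list:
--         s += x
--         prefix.append(s)
--     n = len(bloomed_list)
--     count = 0
--     i = 0
--     while i + k <= n:
--         if prefix[i + k] - prefix[i] >= k:
--             count += 1
--             i += k
--         else:
--             i += 1
--     return count >= m
-- ===== Notes on version B (the rewrite author's own statement) =====
-- stated objective: alternative
-- what changed: B builds a prefix-sum array once and walks a single greedy pointer, testing each window by one subtraction instead of re-slicing and re-summing a length-k window at every step.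
import Mathlib
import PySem

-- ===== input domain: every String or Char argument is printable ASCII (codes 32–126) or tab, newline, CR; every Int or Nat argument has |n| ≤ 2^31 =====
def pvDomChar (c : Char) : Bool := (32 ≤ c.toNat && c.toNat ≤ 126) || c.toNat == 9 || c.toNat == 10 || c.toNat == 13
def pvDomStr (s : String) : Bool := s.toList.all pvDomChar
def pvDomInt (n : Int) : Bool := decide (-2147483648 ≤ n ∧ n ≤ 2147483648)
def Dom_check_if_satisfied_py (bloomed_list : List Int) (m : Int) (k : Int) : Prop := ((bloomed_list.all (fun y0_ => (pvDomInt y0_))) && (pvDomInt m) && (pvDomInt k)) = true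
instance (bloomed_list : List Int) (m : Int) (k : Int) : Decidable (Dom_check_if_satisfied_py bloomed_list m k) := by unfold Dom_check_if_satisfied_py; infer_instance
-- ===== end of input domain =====

-- B replaces A's per-step slice-and-sum of each length-k window by a prefix-sum array
-- built once and a single greedy pointer (objective: alternative).

-- ===== PORT A =====
-- A's while loop: the '1 ≤ k' part of the guard is a totality guard only (for k ≤ 0 the
-- Python loop never terminates; such inputs are outside Pre_ below).
def goA (bl : List Int) (k : Int) (i j found : Int) : Int :=
  if h : 1 ≤ k ∧ j ≤ (bl.length : Int) then
    let cur := PySem.List.slice bl (some i) (some j)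
    let temp_sum := cur.sum
    if temp_sum ≥ k then goA bl k j (j + k) (found + 1)
    else goA bl k (i + 1) (j + 1) found
  else found
termination_by ((bl.length : Int) + 1 - j).toNat
decreasing_by
  · omega
  · omega

def check_if_satisfied_py (bloomed_list : List Int) (m : Int) (k : Int) : Bool :=
  decide (goA bloomed_list k 0 k 0 ≥ m)

-- ===== PORT B =====
-- B's while loop; same totality guard '1 ≤ k' (the Python loop diverges for k ≤ 0).
def goB (pfx : List Int) (n k : Int) (i count : Int) : Int :=
  if h : 1 ≤ k ∧ i + k ≤ n then
    if PySem.List.pyGetD pfx (i + k) 0 - PySem.List.pyGetD pfx i 0 ≥ k then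
      goB pfx n k (i + k) (count + 1)
    else goB pfx n k (i + 1) count
  else count
termination_by (n - i).toNat
decreasing_by
  · omega
  · omega

def check_if_satisfied_py_alt (bloomed_list : List Int) (m : Int) (k : Int) : Bool :=
  let p := (bloomed_list.foldl (fun ps x => (ps.1 ++ [ps.2 + x], ps.2 + x))
              (([0] : List Int), (0 : Int))).1
  decide (goB p (bloomed_list.length : Int) k 0 0 ≥ m)

-- ===== PRECONDITION & SPEC =====
-- Pre_ excludes k ≤ 0, on which A's while loop never terminates (the window end j never
-- moves past len(bloomed_list)); A returns no value there.
def Pre_check_if_satisfied_py (bloomed_list : List Int) (m : Int) (k : Int) : Prop :=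
  1 ≤ k
instance (bloomed_list : List Int) (m : Int) (k : Int) : Decidable (Pre_check_if_satisfied_py bloomed_list m k) := by unfold Pre_check_if_satisfied_py; infer_instance

def pvWitness_check_if_satisfied_py : List Int × Int × Int := ([1, 0, 1, 1], 1, 2)

def Spec_check_if_satisfied_py (bloomed_list : List Int) (m : Int) (k : Int) (out : Bool) : Prop := out = check_if_satisfied_py_alt bloomed_list m k
instance (bloomed_list : List Int) (m : Int) (k : Int) (out : Bool) : Decidable (Spec_check_if_satisfied_py bloomed_list m k out) := by unfold Spec_check_if_satisfied_py; infer_instance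

-- ===== CLAIM (what is proved, stated in full; the proofs are below) =====
def Claim_equal_check_if_satisfied_py : Prop := ∀ (bloomed_list : List Int) (m : Int) (k : Int), Dom_check_if_satisfied_py bloomed_list m k → Pre_check_if_satisfied_py bloomed_list m k → Spec_check_if_satisfied_py bloomed_list m k (check_if_satisfied_py bloomed_list m k)

-- ===== LEMMAS AND PROOFS =====

-- the running sums of bl starting from accumulator s
def scanSums (s : Int) : List Int → List Int
  | [] => []
  | x :: xs => (s + x) :: scanSums (s + x) xs

lemma foldl_pref (bl : List Int) : ∀ (p : List Int) (s : Int),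
    bl.foldl (fun ps x => (ps.1 ++ [ps.2 + x], ps.2 + x)) (p, s)
      = (p ++ scanSums s bl, s + bl.sum) := by
  induction bl with
  | nil => intro p s; simp [scanSums]
  | cons x xs ih =>
      intro p s
      simp only [List.foldl_cons, scanSums, ih, List.append_assoc,
        List.singleton_append, List.sum_cons, Prod.mk.injEq]
      exact ⟨trivial, by ring⟩

lemma getD_scanSums (bl : List Int) : ∀ (s : Int) (i : Nat), i ≤ bl.length →
    (s :: scanSums s bl).getD i 0 = s + (bl.take i).sum := by
  induction bl with
  | nil =>
      intro s i hi
      simp only [List.length_nil, Nat.le_zero] at hi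
      subst hi
      simp [scanSums]
  | cons x xs ih =>
      intro s i hi
      cases i with
      | zero => simp
      | succ n =>
          have := ih (s + x) n (by simpa using hi)
          simp only [scanSums, List.getD_cons_succ] at this ⊢
          rw [this]
          simp [List.sum_cons]
          ring

lemma sum_slice (bl : List Int) (i j : Int) (h0 : 0 ≤ i) (hij : i ≤ j) :
    (PySem.List.slice bl (some i) (some j)).sum
      = (bl.take j.toNat).sum - (bl.take i.toNat).sum := by
  rw [PySem.List.slice_toNat bl h0 (le_trans h0 hij)]
  have hkey : bl.take j.toNat = bl.take i.toNat ++ (bl.drop i.toNat).take (j.toNat - i.toNat) := by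
    rw [← List.take_add]
    congr 1
    omega
  rw [hkey, List.sum_append]
  ring

lemma loop_eq (bl : List Int) (k : Int) (hk : 1 ≤ k) :
    ∀ (N : Nat) (i c : Int), 0 ≤ i → ((bl.length : Int) - i).toNat ≤ N →
      goA bl k i (i + k) c = goB (0 :: scanSums 0 bl) (bl.length : Int) k i c := by
  intro N
  induction N with
  | zero =>
      intro i c hi hN
      rw [goA, goB]
      rw [dif_neg (by omega), dif_neg (by omega)]
  | succ N ih =>
      intro i c hi hN
      by_cases hend : i + k ≤ (bl.length : Int)
      · rw [goA, goB, dif_pos ⟨hk, hend⟩, dif_pos ⟨hk, hend⟩]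
        have hsum : (PySem.List.slice bl (some i) (some (i + k))).sum
            = PySem.List.pyGetD (0 :: scanSums 0 bl) (i + k) 0
              - PySem.List.pyGetD (0 :: scanSums 0 bl) i 0 := by
          obtain ⟨u, hu⟩ : ∃ u : Nat, i = (u : Int) := ⟨i.toNat, by omega⟩
          obtain ⟨t, ht⟩ : ∃ t : Nat, i + k = (t : Int) := ⟨(i + k).toNat, by omega⟩
          have g1 := getD_scanSums bl 0 t (by omega)
          have g2 := getD_scanSums bl 0 u (by omega)
          rw [sum_slice bl i (i + k) hi (by omega), ht, hu,
            PySem.List.pyGetD_natCast, PySem.List.pyGetD_natCast]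
          simp only [Int.toNat_natCast]
          simp only [zero_add] at g1 g2
          rw [g1, g2]
        simp only [hsum]
        split
        · have h1 : i + k + k = (i + k) + k := by ring
          rw [h1, ih (i + k) (c + 1) (by omega) (by omega)]
        · have h1 : i + k + 1 = (i + 1) + k := by ring
          rw [h1, ih (i + 1) c (by omega) (by omega)]
      · rw [goA, goB]
        rw [dif_neg (by omega), dif_neg (by omega)]

-- ===== VERDICT (by name: the statement is the Claim_ definition above) =====
theorem check_if_satisfied_py_spec : Claim_equal_check_if_satisfied_py := by
  intro bl m k _ hk
  unfold Spec_check_if_satisfied_py check_if_satisfied_py check_if_satisfied_py_alt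
  have hp : (bl.foldl (fun ps x => (ps.1 ++ [ps.2 + x], ps.2 + x))
      (([0] : List Int), (0 : Int))).1 = 0 :: scanSums 0 bl := by
    rw [foldl_pref]; simp
  simp only [hp]
  have hmain := loop_eq bl k hk ((bl.length : Int) - 0).toNat 0 0 le_rfl le_rfl
  simp only [zero_add] at hmain
  rw [hmain]
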